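-- pv_equiv track=rewrite | github.com/tomviner/django-plugin-django-debug-toolbar | django_plugin_django_debug_toolbar/__init__.py | inject_middleware
-- ===== SOURCE A (Python) =====
-- def next_index_or_start(list, item):
--     try:
--         return list.index(item) + 1
--     except ValueError:
--         return 0
--
-- def inject_middleware(current_middleware):
--     """Inject DebugToolbarMiddleware early, but not too early."""
--     TOOLBAR_MUST_GO_AFTER = [
--         "xforwardedfor_middleware.middleware.XForwardedForMiddleware",
--         "django.middleware.gzip.GZipMiddleware",
--     ]
--     position = max(next_index_or_start(current_middleware, mw) for mw in TOOLBAR_MUST_GO_AFTER)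
--
--     return current_middleware[:position] + [
--         "debug_toolbar.middleware.DebugToolbarMiddleware"
--     ] + current_middleware[position:]
-- ===== SOURCE B (Python) =====
-- TOOLBAR_MW = "debug_toolbar.middleware.DebugToolbarMiddleware"
-- TOOLBAR_MUST_GO_AFTER = [
--     "xforwardedfor_middleware.middleware.XForwardedForMiddleware",
--     "django.middleware.gzip.GZipMiddleware",
-- ]
--
-- def inject_middleware(current_middleware):
--     """Inject DebugToolbarMiddleware early, but not too early."""
--     # the toolbar goes right after the shortest prefix containing every
--     # must-go-after middleware that is present at all
--     needed = [mw for mw in TOOLBAR_MUST_GO_AFTER if mw in current_middleware]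
--     it = iter(current_middleware)
--     prefix = []
--     while needed:
--         head = next(it)
--         prefix.append(head)
--         needed = [mw for mw in needed if mw != head]
--     return prefix + [TOOLBAR_MW] + list(it)
-- ===== Notes on version B (the rewrite author's own statement) =====
-- stated objective: alternative
-- what changed: Replaces the two list.index scans plus max and slice splicing by a prefix-covering loop: compute which must-go-after middlewares are present, then consume elements into a prefix accumulator, deleting each from the needed list as it passes, and emit the toolbar followed by the untouched rest as soon as the needed list is empty; no indices or slices are computed at all.
import Mathlib
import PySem

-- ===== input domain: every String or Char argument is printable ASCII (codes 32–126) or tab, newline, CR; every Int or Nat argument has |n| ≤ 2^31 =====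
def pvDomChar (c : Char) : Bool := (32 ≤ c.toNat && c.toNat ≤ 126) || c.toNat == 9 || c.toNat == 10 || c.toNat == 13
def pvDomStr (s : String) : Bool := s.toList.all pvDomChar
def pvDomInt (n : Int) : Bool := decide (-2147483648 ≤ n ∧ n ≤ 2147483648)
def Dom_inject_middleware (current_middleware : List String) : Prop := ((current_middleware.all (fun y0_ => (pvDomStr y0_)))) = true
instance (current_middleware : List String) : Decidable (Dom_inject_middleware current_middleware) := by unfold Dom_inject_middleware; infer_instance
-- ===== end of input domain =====

-- B replaces A's two list.index scans + max + slice splicing by a prefix-covering recursion: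
-- filter the must-go-after list by membership, then a loop copies elements into a prefix
-- accumulator, deleting each from the needed list as it passes, and emits the toolbar once
-- needed is empty
-- (objective: alternative, same cost).


-- ===== PORT A =====
-- try: return list.index(item) + 1 except ValueError: return 0
def next_index_or_start (lst : List String) (item : String) : Int :=
  match PySem.List.index? lst item with
  | some i => (i : Int) + 1
  | none => 0

def inject_middleware (current_middleware : List String) : List String :=
  let TOOLBAR_MUST_GO_AFTER : List String :=
    ["xforwardedfor_middleware.middleware.XForwardedForMiddleware",
     "django.middleware.gzip.GZipMiddleware"]
  -- max(generator) over the (nonempty) target list; Python max raises on empty, unreachable here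
  let position : Int :=
    match PySem.List.max? (TOOLBAR_MUST_GO_AFTER.map (fun mw => next_index_or_start current_middleware mw)) (fun y => y) with
    | some p => p
    | none => 0
  PySem.List.slice current_middleware none (some position)
    ++ ["debug_toolbar.middleware.DebugToolbarMiddleware"]
    ++ PySem.List.slice current_middleware (some position) none

-- ===== PORT B =====
def toolbarMW : String := "debug_toolbar.middleware.DebugToolbarMiddleware"
def toolbarMustGoAfter : List String :=
  ["xforwardedfor_middleware.middleware.XForwardedForMiddleware",
   "django.middleware.gzip.GZipMiddleware"]

-- the while loop: prefix accumulator, remaining iterator, shrinking needed list;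
-- the 'acc, [], _ :: _' branch is unreachable at the top-level call (needed's members
-- always occur in remaining), where Python's next(it) would raise StopIteration
def pySplice : List String → List String → List String → List String
  | acc, remaining, [] => acc ++ toolbarMW :: remaining
  | acc, [], _ :: _ => acc
  | acc, h :: rest, n :: ns => pySplice (acc ++ [h]) rest ((n :: ns).filter (fun mw => mw ≠ h))

def inject_middleware_alt (current_middleware : List String) : List String :=
  let needed := toolbarMustGoAfter.filter (fun mw => mw ∈ current_middleware)
  pySplice [] current_middleware needed

-- ===== PRECONDITION & SPEC =====
def Spec_inject_middleware (current_middleware : List String) (out : List String) : Prop := out = inject_middleware_alt current_middleware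
instance (current_middleware : List String) (out : List String) : Decidable (Spec_inject_middleware current_middleware out) := by unfold Spec_inject_middleware; infer_instance

-- ===== CLAIM (what is proved, stated in full; the proofs are below) =====
def Claim_equal_inject_middleware : Prop := ∀ (current_middleware : List String), Dom_inject_middleware current_middleware → Spec_inject_middleware current_middleware (inject_middleware current_middleware)

-- ===== LEMMAS AND PROOFS =====

-- the insertion position as A computes it, folded over a list of targets
def posOf (cm : List String) (needed : List String) : Int :=
  needed.foldr (fun t a => max (next_index_or_start cm t) a) 0

theorem nios_nonneg (cm : List String) (t : String) : 0 ≤ next_index_or_start cm t := by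
  unfold next_index_or_start
  cases h : PySem.List.index? cm t with
  | none => simp
  | some i => simp; omega

theorem nios_not_mem (cm : List String) (t : String) (h : t ∉ cm) :
    next_index_or_start cm t = 0 := by
  unfold next_index_or_start
  rw [(PySem.List.index?_eq_none_iff cm t).2 h]

theorem nios_cons_self (x : String) (xs : List String) :
    next_index_or_start (x :: xs) x = 1 := by
  unfold next_index_or_start
  rw [PySem.List.index?_cons_self]
  simp

theorem nios_cons_ne (x : String) (xs : List String) (t : String) (ht : t ∈ xs) (hne : x ≠ t) :
    next_index_or_start (x :: xs) t = next_index_or_start xs t + 1 := by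
  unfold next_index_or_start
  rw [PySem.List.index?_cons_of_ne xs hne]
  cases h : PySem.List.index? xs t with
  | none => exact absurd ((PySem.List.index?_eq_none_iff xs t).1 h) (by simp [ht])
  | some i => simp

theorem posOf_nonneg (cm needed : List String) : 0 ≤ posOf cm needed := by
  induction needed with
  | nil => simp [posOf]
  | cons t ns ih => simp only [posOf, List.foldr_cons] at *; exact le_trans ih (le_max_right _ _)

theorem posOf_cons (cm : List String) (u : String) (us : List String) :
    posOf cm (u :: us) = max (next_index_or_start cm u) (posOf cm us) := rfl

theorem mem_of_cons_ne {t x : String} {xs : List String} (h : t ∈ x :: xs) (hne : t ≠ x) :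
    t ∈ xs := by
  cases h with
  | head => exact absurd rfl hne
  | tail _ h => exact h

theorem posOf_cons_step (x : String) (xs : List String) (needed : List String)
    (hmem : ∀ t ∈ needed, t ∈ x :: xs) (hne : needed ≠ []) :
    posOf (x :: xs) needed = posOf xs (needed.filter (fun t => t ≠ x)) + 1 := by
  induction needed with
  | nil => exact absurd rfl hne
  | cons t ns ih =>
    have htm : t ∈ x :: xs := hmem t (by simp)
    by_cases hns : ns = []
    · subst hns
      by_cases htx : t = x
      · subst htx
        rw [posOf_cons, nios_cons_self]
        simp only [List.filter_cons, List.filter_nil]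
        rw [if_neg (by simp)]
        simp [posOf]
      · have htxs : t ∈ xs := mem_of_cons_ne htm htx
        rw [posOf_cons, nios_cons_ne x xs t htxs (fun h => htx h.symm)]
        simp only [List.filter_cons, List.filter_nil]
        rw [if_pos (decide_eq_true htx), posOf_cons]
        have := nios_nonneg xs t
        simp only [posOf, List.foldr_nil]
        omega
    · have hrec := ih (fun u hu => hmem u (by simp [hu])) hns
      by_cases htx : t = x
      · subst htx
        rw [posOf_cons, nios_cons_self, hrec]
        simp only [List.filter_cons]
        rw [if_neg (by simp)]
        have := posOf_nonneg xs (ns.filter (fun u => u ≠ t))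
        omega
      · have htxs : t ∈ xs := mem_of_cons_ne htm htx
        rw [posOf_cons, nios_cons_ne x xs t htxs (fun h => htx h.symm), hrec]
        simp only [List.filter_cons]
        rw [if_pos (decide_eq_true htx), posOf_cons]
        omega

theorem pySplice_eq (cm : List String) : ∀ (acc needed : List String), (∀ t ∈ needed, t ∈ cm) →
    pySplice acc cm needed =
      acc ++ cm.take (posOf cm needed).toNat ++ toolbarMW :: cm.drop (posOf cm needed).toNat := by
  induction cm with
  | nil =>
    intro acc needed hmem
    cases needed with
    | nil => simp [pySplice, posOf]
    | cons t ns => exact absurd (hmem t (by simp)) (by simp)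
  | cons x xs ih =>
    intro acc needed hmem
    cases needed with
    | nil => simp [pySplice, posOf]
    | cons t ns =>
      have hstep := posOf_cons_step x xs (t :: ns) hmem (by simp)
      have hq := posOf_nonneg xs ((t :: ns).filter (fun u => u ≠ x))
      have hmem' : ∀ u ∈ (t :: ns).filter (fun v => v ≠ x), u ∈ xs := by
        intro u hu
        rw [List.mem_filter] at hu
        exact mem_of_cons_ne (hmem u hu.1) (by simpa using hu.2)
      rw [show pySplice acc (x :: xs) (t :: ns) =
        pySplice (acc ++ [x]) xs ((t :: ns).filter (fun mw => mw ≠ x)) from rfl,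
        ih _ _ hmem', hstep,
        show ((posOf xs ((t :: ns).filter (fun u => u ≠ x)) + 1).toNat) =
          (posOf xs ((t :: ns).filter (fun u => u ≠ x))).toNat + 1 by omega]
      simp [List.take_succ_cons, List.drop_succ_cons]

theorem inject_middleware_spec : Claim_equal_inject_middleware := by
  unfold Claim_equal_inject_middleware
  intro cm _
  unfold Spec_inject_middleware inject_middleware inject_middleware_alt
  simp only [List.map_cons, List.map_nil]
  rw [PySem.List.max?_id_cons]
  simp only [List.foldl_cons, List.foldl_nil]
  have hmemf : ∀ u ∈ toolbarMustGoAfter.filter (fun mw => mw ∈ cm), u ∈ cm := by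
    intro u hu; rw [List.mem_filter] at hu; simpa using hu.2
  rw [pySplice_eq cm _ _ hmemf]
  have h1 := nios_nonneg cm "xforwardedfor_middleware.middleware.XForwardedForMiddleware"
  have h2 := nios_nonneg cm "django.middleware.gzip.GZipMiddleware"
  have hpos : posOf cm (toolbarMustGoAfter.filter (fun mw => mw ∈ cm)) =
      max (next_index_or_start cm "xforwardedfor_middleware.middleware.XForwardedForMiddleware")
        (next_index_or_start cm "django.middleware.gzip.GZipMiddleware") := by
    by_cases m1 : "xforwardedfor_middleware.middleware.XForwardedForMiddleware" ∈ cm <;>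
      by_cases m2 : "django.middleware.gzip.GZipMiddleware" ∈ cm
    · simp only [toolbarMustGoAfter, List.filter_cons, List.filter_nil]
      rw [if_pos (decide_eq_true m1), if_pos (decide_eq_true m2)]
      simp only [posOf, List.foldr_cons, List.foldr_nil]
      omega
    · simp only [toolbarMustGoAfter, List.filter_cons, List.filter_nil]
      rw [if_pos (decide_eq_true m1), if_neg (by simp [m2])]
      simp only [posOf, List.foldr_cons, List.foldr_nil]
      rw [nios_not_mem cm _ m2]
    · simp only [toolbarMustGoAfter, List.filter_cons, List.filter_nil]
      rw [if_neg (by simp [m1]), if_pos (decide_eq_true m2)]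
      simp only [posOf, List.foldr_cons, List.foldr_nil]
      rw [nios_not_mem cm _ m1]
      omega
    · simp only [toolbarMustGoAfter, List.filter_cons, List.filter_nil]
      rw [if_neg (by simp [m1]), if_neg (by simp [m2])]
      simp only [posOf, List.foldr_nil]
      rw [nios_not_mem cm _ m1, nios_not_mem cm _ m2]
      omega
  rw [hpos]
  set p : Int := max (next_index_or_start cm "xforwardedfor_middleware.middleware.XForwardedForMiddleware")
      (next_index_or_start cm "django.middleware.gzip.GZipMiddleware") with hp
  have hp0 : 0 ≤ p := by omega
  rw [PySem.List.slice_to _ hp0, PySem.List.slice_from _ hp0]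
  simp [toolbarMW]
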